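-- pv_equiv track=rewrite | github.com/vidagy/aoc | aoc/year_2021/task_15.py | extend_cave
-- ===== SOURCE A (Python) =====
-- def extend_cave(times: int, cave: list[list[int]]) -> list[list[int]]:
--     res: list[list[int]] = []
--     for jj in range(times):
--         for j, line in enumerate(cave):
--             new_line: list[int] = []
--             for ii in range(times):
--                 for i, risk in enumerate(line):
--                     new_line.append((risk + ii + jj - 1) % 9 + 1)
--             res.append(new_line)
--     return res
-- ===== SOURCE B (Python) =====
-- def extend_cave(times: int, cave: list[list[int]]) -> list[list[int]]:
--     if times <= 0:
--         return []
--     band = [[(risk + ii - 1) % 9 + 1 for ii in range(times) for risk in line]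
--             for line in cave]
--     res = list(band)
--     for _ in range(times - 1):
--         band = [[v % 9 + 1 for v in row] for row in band]
--         res += band
--     return res
-- ===== Notes on version B (the rewrite author's own statement) =====
-- stated objective: alternative
-- what changed: B builds only the first band of rows with the closed formula, then derives each subsequent band by mapping the previous band's cells through the increment-wrap v % 9 + 1, instead of re-evaluating the (risk+ii+jj-1)%9+1 formula in four nested loops for every cell.
import Mathlib
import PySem

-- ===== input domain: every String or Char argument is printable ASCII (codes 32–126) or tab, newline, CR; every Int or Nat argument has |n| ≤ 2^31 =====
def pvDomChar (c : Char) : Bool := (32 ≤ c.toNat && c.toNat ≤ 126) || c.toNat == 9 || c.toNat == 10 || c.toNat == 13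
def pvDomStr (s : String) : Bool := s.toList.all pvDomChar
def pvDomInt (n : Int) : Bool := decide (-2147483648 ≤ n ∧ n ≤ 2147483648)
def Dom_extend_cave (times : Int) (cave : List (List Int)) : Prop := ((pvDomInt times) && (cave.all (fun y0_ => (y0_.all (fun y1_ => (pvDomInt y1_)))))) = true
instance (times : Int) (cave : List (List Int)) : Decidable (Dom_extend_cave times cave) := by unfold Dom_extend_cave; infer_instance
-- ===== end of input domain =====

-- B builds the first band of rows once, then produces each later band by mapping the
-- previous band's cells through the increment-wrap v % 9 + 1, instead of A's four
-- nested loops re-evaluating the closed formula for every cell (alternative decomposition).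


-- ===== PORT A =====
def extend_cave (times : Int) (cave : List (List Int)) : List (List Int) :=
  (PySem.List.pyRange 0 times 1).foldl (fun res jj =>
    (PySem.List.enumerate cave).foldl (fun res jline =>
      let new_line : List Int :=
        (PySem.List.pyRange 0 times 1).foldl (fun nl ii =>
          (PySem.List.enumerate jline.2).foldl (fun nl irisk =>
            nl ++ [PySem.Int.mod (irisk.2 + ii + jj - 1) 9 + 1]) nl) []
      res ++ [new_line]) res) []

-- ===== PORT B =====
def pvBump (band : List (List Int)) : List (List Int) :=
  band.map (fun row => row.map (fun v => PySem.Int.mod v 9 + 1))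

def extend_cave_alt (times : Int) (cave : List (List Int)) : List (List Int) :=
  if times ≤ 0 then []
  else
    let band := cave.map (fun line =>
      (PySem.List.pyRange 0 times 1).flatMap (fun ii =>
        line.map (fun risk => PySem.Int.mod (risk + ii - 1) 9 + 1)))
    ((PySem.List.pyRange 0 (times - 1) 1).foldl
      (fun st _ => (st.1 ++ pvBump st.2, pvBump st.2)) (band, band)).1

-- ===== PRECONDITION & SPEC =====
def Spec_extend_cave (times : Int) (cave : List (List Int)) (out : List (List Int)) : Prop := out = extend_cave_alt times cave
instance (times : Int) (cave : List (List Int)) (out : List (List Int)) : Decidable (Spec_extend_cave times cave out) := by unfold Spec_extend_cave; infer_instance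

-- ===== CLAIM (what is proved, stated in full; the proofs are below) =====
def Claim_equal_extend_cave : Prop := ∀ (times : Int) (cave : List (List Int)), Dom_extend_cave times cave → Spec_extend_cave times cave (extend_cave times cave)

-- ===== LEMMAS AND PROOFS =====

/-- one extended row of the tiling, at vertical tile index `jj` -/
def pvRow (times jj : Int) (line : List Int) : List Int :=
  (PySem.List.pyRange 0 times 1).flatMap (fun ii =>
    line.map (fun risk => PySem.Int.mod (risk + ii + jj - 1) 9 + 1))

/-- band `jj` of the tiling -/
def pvBandAt (times : Int) (cave : List (List Int)) (jj : Int) : List (List Int) :=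
  cave.map (pvRow times jj)

/-- bands `b, bump b, bump² b, …` (n of them), concatenated -/
def pvBands : Nat → List (List Int) → List (List Int)
  | 0, _ => []
  | n+1, b => b ++ pvBands n (pvBump b)

lemma pvMod_bump (m : Int) :
    PySem.Int.mod (PySem.Int.mod m 9 + 1) 9 + 1 = PySem.Int.mod (m + 1) 9 + 1 := by
  rw [PySem.Int.mod_eq_emod_of_pos (by norm_num : (0:Int) < 9),
      PySem.Int.mod_eq_emod_of_pos (by norm_num : (0:Int) < 9),
      PySem.Int.mod_eq_emod_of_pos (by norm_num : (0:Int) < 9)]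
  omega

lemma pvMap_pvRow (times jj : Int) (line : List Int) :
    (pvRow times jj line).map (fun v => PySem.Int.mod v 9 + 1) = pvRow times (jj + 1) line := by
  unfold pvRow
  rw [List.map_flatMap]
  refine List.flatMap_congr (fun ii _ => ?_)
  rw [List.map_map]
  refine List.map_congr_left (fun r _ => ?_)
  show PySem.Int.mod (PySem.Int.mod (r + ii + jj - 1) 9 + 1) 9 + 1 = _
  rw [pvMod_bump, show r + ii + jj - 1 + 1 = r + ii + (jj + 1) - 1 from by ring]

lemma pvBump_bandAt (times : Int) (cave : List (List Int)) (jj : Int) :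
    pvBump (pvBandAt times cave jj) = pvBandAt times cave (jj + 1) := by
  unfold pvBump pvBandAt
  rw [List.map_map]
  exact List.map_congr_left (fun line _ => pvMap_pvRow times jj line)

lemma pvBands_bandAt (times : Int) (cave : List (List Int)) :
    ∀ (t : Nat) (j : Int), pvBands t (pvBandAt times cave j)
      = (List.range t).flatMap (fun (k : Nat) => pvBandAt times cave (j + (k : Int))) := by
  intro t
  induction t with
  | zero => intro j; simp [pvBands]
  | succ n ih =>
    intro j
    rw [show pvBands (n+1) (pvBandAt times cave j)
          = pvBandAt times cave j ++ pvBands n (pvBump (pvBandAt times cave j)) from rfl,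
        pvBump_bandAt, ih (j + 1), List.range_succ_eq_map, List.flatMap_cons,
        List.flatMap_map]
    congr 1
    · norm_num
    · refine List.flatMap_congr (fun k _ => ?_)
      show pvBandAt times cave (j + 1 + (k : Int)) = pvBandAt times cave (j + ((k + 1 : Nat) : Int))
      congr 1
      push_cast
      ring

lemma pvLoop (l : List Int) :
    ∀ (acc band : List (List Int)),
      ((l.foldl (fun st (_ : Int) => (st.1 ++ pvBump st.2, pvBump st.2)) (acc, band)).1)
        = acc ++ pvBands l.length (pvBump band) := by
  induction l with
  | nil => intro acc band; simp [pvBands]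
  | cons x xs ih =>
    intro acc band
    simp only [List.foldl_cons, List.length_cons, ih]
    simp [pvBands, List.append_assoc]

/-- A equals the flatMap closed form. -/
lemma extend_cave_closed (times : Int) (cave : List (List Int)) :
    extend_cave times cave
      = (PySem.List.pyRange 0 times 1).flatMap (fun jj => pvBandAt times cave jj) := by
  unfold extend_cave
  have inner : ∀ (jj : Int) (line : List Int),
      (PySem.List.pyRange 0 times 1).foldl (fun nl ii =>
        (PySem.List.enumerate line).foldl (fun nl irisk =>
          nl ++ [PySem.Int.mod (irisk.2 + ii + jj - 1) 9 + 1]) nl) []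
      = pvRow times jj line := by
    intro jj line
    have step : ∀ (ii : Int) (nl : List Int),
        (PySem.List.enumerate line).foldl (fun nl irisk =>
          nl ++ [PySem.Int.mod (irisk.2 + ii + jj - 1) 9 + 1]) nl
        = nl ++ line.map (fun r => PySem.Int.mod (r + ii + jj - 1) 9 + 1) := by
      intro ii nl
      rw [PySem.List.foldl_append_singleton_eq_map]
      congr 1
      rw [show (fun (irisk : Int × Int) => PySem.Int.mod (irisk.2 + ii + jj - 1) 9 + 1)
            = (fun r => PySem.Int.mod (r + ii + jj - 1) 9 + 1) ∘ Prod.snd from rfl,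
          ← List.map_map, PySem.List.map_snd_enumerate]
    calc (PySem.List.pyRange 0 times 1).foldl (fun nl ii =>
          (PySem.List.enumerate line).foldl (fun nl irisk =>
            nl ++ [PySem.Int.mod (irisk.2 + ii + jj - 1) 9 + 1]) nl) []
        = (PySem.List.pyRange 0 times 1).foldl (fun nl ii =>
            nl ++ line.map (fun r => PySem.Int.mod (r + ii + jj - 1) 9 + 1)) [] :=
          PySem.List.foldl_congr_mem _ _ _ _ (fun nl ii _ => step ii nl)
      _ = pvRow times jj line := by
          rw [PySem.List.foldl_append_eq_flatMap]; simp [pvRow]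
  have mid : ∀ (jj : Int) (res : List (List Int)),
      (PySem.List.enumerate cave).foldl (fun res jline =>
        res ++ [(PySem.List.pyRange 0 times 1).foldl (fun nl ii =>
          (PySem.List.enumerate jline.2).foldl (fun nl irisk =>
            nl ++ [PySem.Int.mod (irisk.2 + ii + jj - 1) 9 + 1]) nl) []]) res
      = res ++ pvBandAt times cave jj := by
    intro jj res
    calc (PySem.List.enumerate cave).foldl (fun res jline =>
          res ++ [(PySem.List.pyRange 0 times 1).foldl (fun nl ii =>
            (PySem.List.enumerate jline.2).foldl (fun nl irisk =>
              nl ++ [PySem.Int.mod (irisk.2 + ii + jj - 1) 9 + 1]) nl) []]) res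
        = (PySem.List.enumerate cave).foldl (fun res jline =>
            res ++ [pvRow times jj jline.2]) res :=
          PySem.List.foldl_congr_mem _ _ _ _
            (fun res jline _ => by rw [inner jj jline.2])
      _ = res ++ pvBandAt times cave jj := by
          rw [PySem.List.foldl_append_singleton_eq_map]
          congr 1
          rw [show (fun (jline : Int × List Int) => pvRow times jj jline.2)
                = pvRow times jj ∘ Prod.snd from rfl,
              ← List.map_map, PySem.List.map_snd_enumerate]
          rfl
  calc (PySem.List.pyRange 0 times 1).foldl (fun res jj =>
        (PySem.List.enumerate cave).foldl (fun res jline =>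
          res ++ [(PySem.List.pyRange 0 times 1).foldl (fun nl ii =>
            (PySem.List.enumerate jline.2).foldl (fun nl irisk =>
              nl ++ [PySem.Int.mod (irisk.2 + ii + jj - 1) 9 + 1]) nl) []]) res) []
      = (PySem.List.pyRange 0 times 1).foldl (fun res jj =>
          res ++ pvBandAt times cave jj) [] :=
        PySem.List.foldl_congr_mem _ _ _ _ (fun res jj _ => mid jj res)
    _ = _ := by rw [PySem.List.foldl_append_eq_flatMap]; simp

-- ===== VERDICT (by name: the statement is the Claim_ definition above) =====
theorem extend_cave_spec : Claim_equal_extend_cave := by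
  intro times cave _
  unfold Spec_extend_cave extend_cave_alt
  rw [extend_cave_closed]
  by_cases h : times ≤ 0
  · simp [h, PySem.List.pyRange_one_eq_nil h]
  · simp only [h, if_false]
    have hband : cave.map (fun line =>
        (PySem.List.pyRange 0 times 1).flatMap (fun ii =>
          line.map (fun risk => PySem.Int.mod (risk + ii - 1) 9 + 1)))
        = pvBandAt times cave 0 := by
      refine List.map_congr_left (fun line _ => ?_)
      unfold pvRow
      refine List.flatMap_congr (fun ii _ => ?_)
      refine List.map_congr_left (fun r _ => ?_)
      rw [show r + ii + 0 - 1 = r + ii - 1 from by ring]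
    rw [hband, pvLoop, PySem.List.length_pyRange_one, pvBump_bandAt]
    have hlen : (times - 1 - 0).toNat + 1 = times.toNat := by omega
    have hsplit : pvBandAt times cave 0 ++ pvBands (times - 1 - 0).toNat (pvBandAt times cave (0 + 1))
        = pvBands times.toNat (pvBandAt times cave 0) := by
      rw [← hlen]
      show _ = pvBandAt times cave 0 ++ pvBands (times - 1 - 0).toNat (pvBump (pvBandAt times cave 0))
      rw [pvBump_bandAt]
    rw [hsplit, pvBands_bandAt, PySem.List.pyRange_one, List.flatMap_map, sub_zero]
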